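-- pv_equiv track=rewrite | github.com/hunseok329/programmers | 모의고사.py | solution
-- ===== SOURCE A (Python) =====
-- def solution(answers):
--     first = [1, 2, 3, 4, 5]
--     second = [2, 1, 2, 3, 2, 4, 2, 5]
--     thrid = [3, 3, 1, 1, 2, 2, 4, 4, 5, 5]
--     count = [0, 0, 0]
--     for i in range(len(answers)):
--         if answers[i] == first[i % 5]:
--             count[0] += 1
--         if answers[i] == second[i % 8]:
--             count[1] += 1
--         if answers[i] == thrid[i % 10]:
--             count[2] += 1
--     return [index + 1 for index, value in enumerate(count) if value == max(count)]
-- ===== SOURCE B (Python) =====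
-- def score(answers, pattern):
--     # one pass per pattern: rotate through a working copy of the pattern
--     total = 0
--     cur = []
--     for a in answers:
--         if not cur:
--             cur = list(pattern)
--         p = cur[0]
--         cur = cur[1:]
--         if a == p:
--             total += 1
--     return total
--
--
-- def solution(answers):
--     patterns = [[1, 2, 3, 4, 5],
--                 [2, 1, 2, 3, 2, 4, 2, 5],
--                 [3, 3, 1, 1, 2, 2, 4, 4, 5, 5]]
--     counts = [score(answers, p) for p in patterns]
--     best = max(counts)
--     return [i + 1 for i, v in enumerate(counts) if v == best]
-- ===== Notes on version B (the rewrite author's own statement) =====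
-- stated objective: alternative
-- what changed: A's single fused index-loop with modular indexing into three fixed lists becomes three independent passes, each scoring one pattern by consuming a rotating working copy of it (no index arithmetic), with the totals collected into a list and the winners read off once.
import Mathlib
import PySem

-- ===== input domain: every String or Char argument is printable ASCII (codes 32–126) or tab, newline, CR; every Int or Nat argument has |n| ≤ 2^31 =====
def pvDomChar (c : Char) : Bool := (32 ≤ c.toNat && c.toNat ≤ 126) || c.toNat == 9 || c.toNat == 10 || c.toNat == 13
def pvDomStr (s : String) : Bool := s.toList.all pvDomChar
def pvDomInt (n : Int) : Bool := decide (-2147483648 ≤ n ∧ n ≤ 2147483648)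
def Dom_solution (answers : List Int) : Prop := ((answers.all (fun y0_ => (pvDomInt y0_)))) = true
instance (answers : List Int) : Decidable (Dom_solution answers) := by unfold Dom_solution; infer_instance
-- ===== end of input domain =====

-- B replaces A's fused index-modular loop by three independent passes, one per
-- pattern, each consuming a rotating working copy of the pattern (alternative
-- decomposition, same cost).

-- ===== PORT A =====
-- indices i, i % 5, i % 8, i % 10 are always in range, so pyGetD's default 0 is never used
def solution (answers : List Int) : List Int :=
  let first : List Int := [1, 2, 3, 4, 5]
  let second : List Int := [2, 1, 2, 3, 2, 4, 2, 5]
  let thrid : List Int := [3, 3, 1, 1, 2, 2, 4, 4, 5, 5]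
  let count :=
    (PySem.List.pyRange 0 (answers.length : Int) 1).foldl
      (fun (c : Int × Int × Int) (i : Int) =>
        ( if PySem.List.pyGetD answers i 0 = PySem.List.pyGetD first (PySem.Int.mod i 5) 0 then c.1 + 1 else c.1,
          if PySem.List.pyGetD answers i 0 = PySem.List.pyGetD second (PySem.Int.mod i 8) 0 then c.2.1 + 1 else c.2.1,
          if PySem.List.pyGetD answers i 0 = PySem.List.pyGetD thrid (PySem.Int.mod i 10) 0 then c.2.2 + 1 else c.2.2 ))
      (0, 0, 0)
  let countL : List Int := [count.1, count.2.1, count.2.2]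
  let m := (PySem.List.max? countL (fun y => y)).getD 0  -- countL has 3 elements, max? is some
  ((PySem.List.enumerate countL 0).filter (fun p => p.2 == m)).map (fun p => p.1 + 1)

-- ===== PORT B =====
-- one step of Source B's score loop: refill the working copy when empty, pop its head, compare
def pvScoreStep (pattern : List Int) (st : Int × List Int) (a : Int) : Int × List Int :=
  let cur := if st.2.isEmpty then pattern else st.2
  match cur with
  | [] => (st.1, [])
  | p :: rest => (if a = p then st.1 + 1 else st.1, rest)

def pvScore (answers pattern : List Int) : Int :=
  (answers.foldl (pvScoreStep pattern) (0, [])).1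

def solution_alt (answers : List Int) : List Int :=
  let patterns : List (List Int) :=
    [[1, 2, 3, 4, 5], [2, 1, 2, 3, 2, 4, 2, 5], [3, 3, 1, 1, 2, 2, 4, 4, 5, 5]]
  let counts := patterns.map (fun p => pvScore answers p)
  let best := (PySem.List.max? counts (fun y => y)).getD 0  -- counts has 3 elements, max? is some
  ((PySem.List.enumerate counts 0).filter (fun p => p.2 == best)).map (fun p => p.1 + 1)

-- ===== PRECONDITION & SPEC =====
def Spec_solution (answers : List Int) (out : List Int) : Prop := out = solution_alt answers
instance (answers : List Int) (out : List Int) : Decidable (Spec_solution answers out) := by unfold Spec_solution; infer_instance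

-- ===== CLAIM (what is proved, stated in full; the proofs are below) =====
def Claim_equal_solution : Prop := ∀ (answers : List Int), Dom_solution answers → Spec_solution answers (solution answers)

-- ===== LEMMAS AND PROOFS =====

theorem succ_mod (s n : Nat) (hn : 0 < n) :
    (s + 1) % n = if s % n + 1 = n then 0 else s % n + 1 := by
  rcases Nat.lt_or_ge 1 n with h | h
  · rw [Nat.add_mod, Nat.mod_eq_of_lt h]
    split_ifs with he
    · rw [he, Nat.mod_self]
    · exact Nat.mod_eq_of_lt (by have := Nat.mod_lt s hn; omega)
  · interval_cases n
    simp [Nat.mod_one]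

theorem pvScoreStep_empty (pat : List Int) (t : Int) (a : Int) :
    pvScoreStep pat (t, []) a = pvScoreStep pat (t, pat) a := by
  cases pat <;> simp [pvScoreStep]

theorem score_fold_empty_full (pat : List Int) (ans : List Int) (t : Int) :
    (ans.foldl (pvScoreStep pat) (t, [])).1 = (ans.foldl (pvScoreStep pat) (t, pat)).1 := by
  cases ans with
  | nil => rfl
  | cons a rest => simp only [List.foldl_cons, pvScoreStep_empty]

theorem pvScoreStep_cons (pattern : List Int) (t : Int) (p : Int) (rest : List Int) (a : Int) :
    pvScoreStep pattern (t, p :: rest) a = (if a = p then t + 1 else t, rest) := rfl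

-- invariant of Source B's score loop against A's modular-index count
theorem loop_inv (pat : List Int) (hpat : pat ≠ []) (ans : List Int) :
    ∀ (s : Nat) (t : Int),
      (PySem.List.enumerate ans (s : Int)).foldl
        (fun t p => if p.2 = PySem.List.pyGetD pat (PySem.Int.mod p.1 (pat.length : Int)) 0 then t + 1 else t) t
      = (ans.foldl (pvScoreStep pat) (t, pat.drop (s % pat.length))).1 := by
  induction ans with
  | nil => intro s t; rfl
  | cons a rest ih =>
    intro s t
    have hlen : 0 < pat.length := List.length_pos_of_ne_nil hpat
    have hk : s % pat.length < pat.length := Nat.mod_lt s hlen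
    have hdrop : pat.drop (s % pat.length) = pat[s % pat.length] :: pat.drop (s % pat.length + 1) :=
      List.drop_eq_getElem_cons hk
    have hget : PySem.List.pyGetD pat (PySem.Int.mod (s : Int) (pat.length : Int)) 0
        = pat[s % pat.length] := by
      rw [PySem.Int.mod_natCast, PySem.List.pyGetD_natCast]
      exact List.getD_eq_getElem pat 0 hk
    have hstep : pvScoreStep pat (t, pat.drop (s % pat.length)) a
        = ((if a = pat[s % pat.length] then t + 1 else t), pat.drop (s % pat.length + 1)) := by
      rw [hdrop, pvScoreStep_cons]
    have hcast : (s : Int) + 1 = ((s + 1 : Nat) : Int) := by push_cast; ring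
    rw [PySem.List.enumerate_cons, List.foldl_cons, List.foldl_cons, hstep, hcast, ih (s + 1)]
    simp only [hget]
    by_cases hm : s % pat.length + 1 = pat.length
    · rw [succ_mod s pat.length hlen, if_pos hm, List.drop_zero,
        show pat.drop (s % pat.length + 1) = ([] : List Int) by rw [hm]; simp,
        score_fold_empty_full]
    · rw [succ_mod s pat.length hlen, if_neg hm]

theorem count_eq (answers pat : List Int) (L : Int) (hL : (pat.length : Int) = L) (hpat : pat ≠ []) :
    (PySem.List.pyRange 0 (answers.length : Int) 1).foldl
      (fun t i => if PySem.List.pyGetD answers i 0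
          = PySem.List.pyGetD pat (PySem.Int.mod i L) 0 then t + 1 else t) 0
    = pvScore answers pat := by
  rw [← hL]
  have he := PySem.List.enumerate_eq_map_pyRange (xs := answers) (d := (0 : Int))
  calc
    (PySem.List.pyRange 0 (answers.length : Int) 1).foldl
        (fun t i => if PySem.List.pyGetD answers i 0
            = PySem.List.pyGetD pat (PySem.Int.mod i (pat.length : Int)) 0 then t + 1 else t) 0
      = (PySem.List.enumerate answers ((0 : Nat) : Int)).foldl
          (fun t p => if p.2 = PySem.List.pyGetD pat (PySem.Int.mod p.1 (pat.length : Int)) 0 then t + 1 else t) 0 := by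
        rw [show ((0 : Nat) : Int) = (0 : Int) from rfl, he, List.foldl_map]
        rfl
    _ = (answers.foldl (pvScoreStep pat) (0, pat.drop (0 % pat.length))).1 := loop_inv pat hpat answers 0 0
    _ = pvScore answers pat := by
        rw [Nat.zero_mod, List.drop_zero, ← score_fold_empty_full]
        rfl

-- ===== VERDICT (by name: the statement is the Claim_ definition above) =====
theorem solution_spec : Claim_equal_solution := by
  intro answers _
  simp only [Spec_solution, solution, solution_alt]
  rw [PySem.List.foldl_prod_mk
        (f := fun t i => if PySem.List.pyGetD answers i 0
            = PySem.List.pyGetD [(1:Int), 2, 3, 4, 5] (PySem.Int.mod i 5) 0 then t + 1 else t)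
        (g := fun (c : Int × Int) (i : Int) =>
          ( if PySem.List.pyGetD answers i 0 = PySem.List.pyGetD [(2:Int), 1, 2, 3, 2, 4, 2, 5] (PySem.Int.mod i 8) 0 then c.1 + 1 else c.1,
            if PySem.List.pyGetD answers i 0 = PySem.List.pyGetD [(3:Int), 3, 1, 1, 2, 2, 4, 4, 5, 5] (PySem.Int.mod i 10) 0 then c.2 + 1 else c.2 ))]
  rw [PySem.List.foldl_prod_mk
        (f := fun t i => if PySem.List.pyGetD answers i 0
            = PySem.List.pyGetD [(2:Int), 1, 2, 3, 2, 4, 2, 5] (PySem.Int.mod i 8) 0 then t + 1 else t)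
        (g := fun t i => if PySem.List.pyGetD answers i 0
            = PySem.List.pyGetD [(3:Int), 3, 1, 1, 2, 2, 4, 4, 5, 5] (PySem.Int.mod i 10) 0 then t + 1 else t)]
  rw [count_eq answers [1, 2, 3, 4, 5] 5 (by norm_num) (by simp),
      count_eq answers [2, 1, 2, 3, 2, 4, 2, 5] 8 (by norm_num) (by simp),
      count_eq answers [3, 3, 1, 1, 2, 2, 4, 4, 5, 5] 10 (by norm_num) (by simp)]
  simp only [List.map_cons, List.map_nil]
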